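-- pv_equiv track=rewrite | github.com/kaluginpeter/Algorithms_and_structures_tasks | CodeWars/5kyu/Digitwise_addition.py | digitwise_addition
-- ===== SOURCE A (Python) =====
-- def digitwise_addition(N, K):
--     MOD = 10 ** 9 + 7
--
--     # Initialize a list to store the mappings for each digit
--     addition = [
--         [1],  # 0 -> 1
--         [2],  # 1 -> 2
--         [3],  # 2 -> 3
--         [4],  # 3 -> 4
--         [5],  # 4 -> 5
--         [6],  # 5 -> 6
--         [7],  # 6 -> 7
--         [8],  # 7 -> 8
--         [9],  # 8 -> 9
--         [1, 0]  # 9 -> 1, 0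
--     ]
--
--     # Initialize a count list to keep track of the occurrences of each digit
--     count = [0] * 10
--     for digit in str(N):
--         count[int(digit)] += 1
--
--     # Iterate K times to simulate the process
--     for _ in range(K):
--         new_count = [0] * 10
--         for digit in range(10):
--             for new_digit in addition[digit]:
--                 new_count[new_digit] = (new_count[new_digit] + count[digit]) % MOD
--         count = new_count
--
--     # Sum the counts of all digits
--     total_count = sum(count) % MOD
--
--     return total_count
-- ===== SOURCE B (Python) =====
-- def digitwise_addition(N, K):
--     MOD = 10 ** 9 + 7
--     # Adjoint (transpose) dynamics: lengths[d] = number of digits that a single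
--     # starting digit d has produced after k steps (mod MOD).  One step of the
--     # original process shifts this table left and appends lengths[0]+lengths[1]
--     # (digit 9 turns into the two digits 1 and 0).  The answer is the sum of
--     # lengths[d] over the digits d of N -- no 10-counter vector is simulated.
--     lengths = [1] * 10
--     for _ in range(K):
--         lengths = lengths[1:] + [(lengths[0] + lengths[1]) % MOD]
--     return sum(lengths[int(d)] for d in str(N)) % MOD
-- ===== Notes on version B (the rewrite author's own statement) =====
-- stated objective: faster
-- what changed: Instead of forward-simulating the 10-entry digit-count vector through the scatter table and summing counts, B iterates the adjoint (transpose) dynamics on a per-digit length table (shift left, append lengths[0]+lengths[1]) and finally sums lengths[d] over the digits of N.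
import Mathlib
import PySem

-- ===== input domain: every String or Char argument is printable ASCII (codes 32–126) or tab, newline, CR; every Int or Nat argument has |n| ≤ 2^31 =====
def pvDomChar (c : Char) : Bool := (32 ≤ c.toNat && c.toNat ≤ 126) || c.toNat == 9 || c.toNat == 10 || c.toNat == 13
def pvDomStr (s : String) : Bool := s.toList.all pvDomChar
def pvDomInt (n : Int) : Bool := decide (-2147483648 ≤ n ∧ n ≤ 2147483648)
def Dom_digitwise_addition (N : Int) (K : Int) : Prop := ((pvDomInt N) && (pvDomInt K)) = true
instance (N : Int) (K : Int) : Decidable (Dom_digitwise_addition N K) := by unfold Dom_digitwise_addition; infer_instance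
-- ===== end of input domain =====

-- B replaces A's forward simulation of the 10-entry digit-count vector by the adjoint
-- (transpose) iteration on a per-digit length table; measured constant-factor speedup.

-- ===== PORT A =====
def pvMOD : Int := 1000000007

def pvAddition : List (List Int) := [[1],[2],[3],[4],[5],[6],[7],[8],[9],[1, 0]]

-- int(d) for a one-character string d, as both Pythons use it on the characters of str(N);
-- the .getD 0 / .toNat defaults are never reached under Pre_ (all characters are digits 0-9).
def pvDigit (ch : Char) : Nat := ((PySem.Int.ofChars? [ch]).getD 0).toNat

-- 'for digit in str(N): count[int(digit)] += 1' (list indexing is in range under Pre_)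
def pvCountA (N : Int) : List Int :=
  (PySem.Int.toChars N).foldl
    (fun count ch => count.set (pvDigit ch) (count.getD (pvDigit ch) 0 + 1))
    (List.replicate 10 0)

-- one iteration of A's K-loop: the nested 'for digit in range(10): for new_digit in addition[digit]'
def pvStepA (count : List Int) : List Int :=
  (PySem.List.pyRange 0 10 1).foldl
    (fun nc digit =>
      (pvAddition.getD digit.toNat []).foldl
        (fun nc nd =>
          nc.set nd.toNat (PySem.Int.mod (nc.getD nd.toNat 0 + count.getD digit.toNat 0) pvMOD))
        nc)
    (List.replicate 10 0)

-- 'for _ in range(K): count = new_count' (range(K) has K.toNat iterations)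
def pvLoopA : Nat → List Int → List Int
  | 0, c => c
  | n + 1, c => pvLoopA n (pvStepA c)

def digitwise_addition (N : Int) (K : Int) : Int :=
  PySem.Int.mod (pvLoopA K.toNat (pvCountA N)).sum pvMOD

-- ===== PORT B =====
-- 'lengths = lengths[1:] + [(lengths[0] + lengths[1]) % MOD]'
def pvStepB (l : List Int) : List Int :=
  PySem.List.slice l (some 1) none ++ [PySem.Int.mod (l.getD 0 0 + l.getD 1 0) pvMOD]

def pvLoopB : Nat → List Int → List Int
  | 0, l => l
  | n + 1, l => pvLoopB n (pvStepB l)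

-- 'sum(lengths[int(d)] for d in str(N)) % MOD'
def digitwise_addition_alt (N : Int) (K : Int) : Int :=
  let lengths := pvLoopB K.toNat (List.replicate 10 1)
  PySem.Int.mod
    ((PySem.Int.toChars N).foldl (fun acc ch => acc + lengths.getD (pvDigit ch) 0) 0)
    pvMOD

-- ===== PRECONDITION & SPEC =====
-- Pre_ excludes N < 0: there str(N) starts with '-' and Python's int('-') raises ValueError in both A and B.
def Pre_digitwise_addition (N : Int) (K : Int) : Prop := 0 ≤ N
instance (N : Int) (K : Int) : Decidable (Pre_digitwise_addition N K) := by unfold Pre_digitwise_addition; infer_instance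

def pvWitness_digitwise_addition : Int × Int := (1234, 5)

def Spec_digitwise_addition (N : Int) (K : Int) (out : Int) : Prop := out = digitwise_addition_alt N K
instance (N : Int) (K : Int) (out : Int) : Decidable (Spec_digitwise_addition N K out) := by unfold Spec_digitwise_addition; infer_instance

-- ===== CLAIM (what is proved, stated in full; the proofs are below) =====
def Claim_equal_digitwise_addition : Prop := ∀ (N : Int) (K : Int), Dom_digitwise_addition N K → Pre_digitwise_addition N K → Spec_digitwise_addition N K (digitwise_addition N K)

-- ===== LEMMAS AND PROOFS =====

-- the ⟨counts, lengths⟩ pairing both programs preserve: a 10-term dot product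
def pvDot (a b : List Int) : Int :=
  a.getD 0 0 * b.getD 0 0 + a.getD 1 0 * b.getD 1 0 + a.getD 2 0 * b.getD 2 0 +
  a.getD 3 0 * b.getD 3 0 + a.getD 4 0 * b.getD 4 0 + a.getD 5 0 * b.getD 5 0 +
  a.getD 6 0 * b.getD 6 0 + a.getD 7 0 * b.getD 7 0 + a.getD 8 0 * b.getD 8 0 +
  a.getD 9 0 * b.getD 9 0

lemma pvLen10 (l : List Int) (hl : l.length = 10) :
    ∃ x0 x1 x2 x3 x4 x5 x6 x7 x8 x9 : Int, l = [x0, x1, x2, x3, x4, x5, x6, x7, x8, x9] := by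
  rcases l with _ | ⟨x0, _ | ⟨x1, _ | ⟨x2, _ | ⟨x3, _ | ⟨x4, _ | ⟨x5, _ | ⟨x6, _ | ⟨x7, _ |
    ⟨x8, _ | ⟨x9, _ | ⟨x10, t⟩⟩⟩⟩⟩⟩⟩⟩⟩⟩⟩ <;> simp_all

lemma pvStepA_eq (c : List Int) : pvStepA c =
    [PySem.Int.mod (0 + c.getD 9 0) pvMOD,
     PySem.Int.mod (PySem.Int.mod (0 + c.getD 0 0) pvMOD + c.getD 9 0) pvMOD,
     PySem.Int.mod (0 + c.getD 1 0) pvMOD, PySem.Int.mod (0 + c.getD 2 0) pvMOD,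
     PySem.Int.mod (0 + c.getD 3 0) pvMOD, PySem.Int.mod (0 + c.getD 4 0) pvMOD,
     PySem.Int.mod (0 + c.getD 5 0) pvMOD, PySem.Int.mod (0 + c.getD 6 0) pvMOD,
     PySem.Int.mod (0 + c.getD 7 0) pvMOD, PySem.Int.mod (0 + c.getD 8 0) pvMOD] := rfl

lemma pvStepA_len (c : List Int) : (pvStepA c).length = 10 := rfl

lemma pvLoopA_len : ∀ (n : Nat) (c : List Int), c.length = 10 → (pvLoopA n c).length = 10
  | 0, _, h => h
  | n + 1, c, _ => pvLoopA_len n (pvStepA c) (pvStepA_len c)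

lemma pvStepB_eq (x0 x1 x2 x3 x4 x5 x6 x7 x8 x9 : Int) :
    pvStepB [x0, x1, x2, x3, x4, x5, x6, x7, x8, x9] =
      [x1, x2, x3, x4, x5, x6, x7, x8, x9, PySem.Int.mod (x0 + x1) pvMOD] := rfl

lemma pvLoopB_len : ∀ (n : Nat) (l : List Int), l.length = 10 → (pvLoopB n l).length = 10 := by
  intro n
  induction n with
  | zero => exact fun l h => h
  | succ n ih =>
    intro l hl
    obtain ⟨x0, x1, x2, x3, x4, x5, x6, x7, x8, x9, rfl⟩ := pvLen10 l hl
    exact ih _ (by rw [pvStepB_eq]; rfl)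

lemma pvLoopB_comm : ∀ (n : Nat) (l : List Int), pvLoopB n (pvStepB l) = pvStepB (pvLoopB n l) := by
  intro n
  induction n with
  | zero => exact fun l => rfl
  | succ n ih => exact fun l => ih (pvStepB l)

lemma pvcast (a : ℤ) : ((a % (1000000007 : ℤ) : ℤ) : ZMod 1000000007) = (a : ZMod 1000000007) := by
  have h := ZMod.intCast_mod a 1000000007
  simpa using h

lemma pvmod_emod (a : Int) : PySem.Int.mod a pvMOD = a % 1000000007 :=
  PySem.Int.mod_eq_emod_of_pos (by norm_num [pvMOD])

-- the exchange step: one forward step of A's counts against the lengths table equals the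
-- counts against one step of B's lengths table, modulo pvMOD
lemma pvKey (c : List Int) (x0 x1 x2 x3 x4 x5 x6 x7 x8 x9 : Int) :
    PySem.Int.mod (pvDot (pvStepA c) [x0, x1, x2, x3, x4, x5, x6, x7, x8, x9]) pvMOD =
      PySem.Int.mod (pvDot c (pvStepB [x0, x1, x2, x3, x4, x5, x6, x7, x8, x9])) pvMOD := by
  rw [pvStepA_eq, pvStepB_eq]
  simp only [pvmod_emod]
  simp [pvDot, List.getD]
  rw [show (1000000007 : ℤ) = ((1000000007 : ℕ) : ℤ) by norm_num]
  refine (ZMod.intCast_eq_intCast_iff _ _ _).mp ?_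
  push_cast [pvcast]
  ring

-- one character of str(N): A increments count[int(d)], B adds lengths[int(d)]
lemma pvDot_set_inc (c L : List Int) (hc : c.length = 10) (hL : L.length = 10) (d : Nat) :
    pvDot (c.set d (c.getD d 0 + 1)) L = pvDot c L + L.getD d 0 := by
  obtain ⟨c0, c1, c2, c3, c4, c5, c6, c7, c8, c9, rfl⟩ := pvLen10 c hc
  obtain ⟨y0, y1, y2, y3, y4, y5, y6, y7, y8, y9, rfl⟩ := pvLen10 L hL
  by_cases hd : d < 10
  · interval_cases d <;> (simp [pvDot, List.getD, List.set]; try ring)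
  · rw [List.set_eq_of_length_le (by simp; omega)]
    have h0 : ([y0, y1, y2, y3, y4, y5, y6, y7, y8, y9] : List Int).getD d 0 = 0 := by
      rw [List.getD_eq_default]
      simpa using hd
    rw [h0]
    ring

lemma pvCount_dot : ∀ (cs : List Char) (c L : List Int), c.length = 10 → L.length = 10 →
    pvDot (cs.foldl (fun cnt ch => cnt.set (pvDigit ch) (cnt.getD (pvDigit ch) 0 + 1)) c) L
      = pvDot c L + (cs.map (fun ch => L.getD (pvDigit ch) 0)).sum := by
  intro cs
  induction cs with
  | nil => intro c L _ _; simp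
  | cons ch cs ih =>
    intro c L hc hL
    rw [List.foldl_cons, ih _ _ (by simp [hc]) hL, pvDot_set_inc c L hc hL,
      List.map_cons, List.sum_cons]
    ring

-- A's final sum(count) is the dot product with the all-ones table B starts from
lemma pvSum_dot (x : List Int) (hx : x.length = 10) :
    x.sum = pvDot x (List.replicate 10 1) := by
  obtain ⟨x0, x1, x2, x3, x4, x5, x6, x7, x8, x9, rfl⟩ := pvLen10 x hx
  simp [pvDot, List.getD, List.replicate]
  ring

lemma pvDot_zeros (L : List Int) : pvDot (List.replicate 10 0) L = 0 := by
  simp [pvDot, List.replicate, List.getD]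

-- the invariant: counts pushed n steps forward against a table = counts against the table
-- pulled n steps back, modulo pvMOD
lemma pvInv : ∀ (n : Nat) (c m : List Int), m.length = 10 →
    PySem.Int.mod (pvDot (pvLoopA n c) m) pvMOD
      = PySem.Int.mod (pvDot c (pvLoopB n m)) pvMOD := by
  intro n
  induction n with
  | zero => intro c m _; rfl
  | succ n ih =>
    intro c m hm
    have h1 : pvLoopA (n + 1) c = pvLoopA n (pvStepA c) := rfl
    have h2 : pvLoopB (n + 1) m = pvStepB (pvLoopB n m) := pvLoopB_comm n m
    obtain ⟨y0, y1, y2, y3, y4, y5, y6, y7, y8, y9, hy⟩ := pvLen10 _ (pvLoopB_len n m hm)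
    rw [h1, ih (pvStepA c) m hm, h2, hy, pvKey]

lemma pvCountA_len (N : Int) : (pvCountA N).length = 10 := by
  unfold pvCountA
  generalize PySem.Int.toChars N = cs
  induction cs using List.reverseRecOn with
  | nil => rfl
  | append_singleton cs ch ih => rw [List.foldl_append, List.foldl_cons, List.foldl_nil,
      List.length_set, ih]

-- ===== VERDICT (by name: the statement is the Claim_ definition above) =====
theorem digitwise_addition_spec : Claim_equal_digitwise_addition := by
  intro N K _ _
  show PySem.Int.mod (pvLoopA K.toNat (pvCountA N)).sum pvMOD
      = PySem.Int.mod ((PySem.Int.toChars N).foldl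
          (fun acc ch => acc + (pvLoopB K.toNat (List.replicate 10 1)).getD (pvDigit ch) 0) 0) pvMOD
  have hL : (pvLoopB K.toNat (List.replicate 10 1)).length = 10 :=
    pvLoopB_len _ _ (by simp)
  rw [PySem.List.foldl_add (g := fun ch =>
        (pvLoopB K.toNat (List.replicate 10 1)).getD (pvDigit ch) 0),
      pvSum_dot _ (pvLoopA_len K.toNat (pvCountA N) (pvCountA_len N)),
      pvInv K.toNat (pvCountA N) (List.replicate 10 1) (by simp)]
  unfold pvCountA
  rw [pvCount_dot (PySem.Int.toChars N) (List.replicate 10 0) _ (by simp) hL, pvDot_zeros]
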